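-- pv_equiv track=rewrite | github.com/asiftm/Semester2-Scripting | assignments/licence_plate_with_regex.py | check
-- ===== SOURCE A (Python) =====
-- def forbidden(plate):
--     forbidden_letter_combinations = 'AAP AAS AEL ALA ANE ASS BEB BIT BOM BOY BSP BUB BWP BYT CAP CDF CDH CDV CON CSP CUB CUL CUT CVP DCD DIK DOM FDF FOK FOL FOU FUC FUK GAT GAY GEK GOD HIV HOL JEK KAK KKQ KUL KUT LAF LDD LSP LUL MAS MCC MDP MOR MOU MST NIC NIK NIQ NVA PDB PDO PET PFF PIK PIN PIP PIS PJU PKK POT PRL PSB PSC PSL PTB PUE PUT PVV PYK PYN PYP PYS ROM SEX SOA SOT SPA SUL TAK TET TIT TUE VCD VIH VLD VMO VNV ZAC ZAK ZOT'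
--     forbidden_list = forbidden_letter_combinations.split(' ')
--     condition = False
--     for i in forbidden_list:
--         if i in plate:
--             condition = True
--             break
--         else:
--             condition = False
--     return (condition)
--
-- def check(plate):
--     # forbidden
--     forbidden_letter_combinations = 'AAP AAS AEL ALA ANE ASS BEB BIT BOM BOY BSP BUB BWP BYT CAP CDF CDH CDV CON CSP CUB CUL CUT CVP DCD DIK DOM FDF FOK FOL FOU FUC FUK GAT GAY GEK GOD HIV HOL JEK KAK KKQ KUL KUT LAF LDD LSP LUL MAS MCC MDP MOR MOU MST NIC NIK NIQ NVA PDB PDO PET PFF PIK PIN PIP PIS PJU PKK POT PRL PSB PSC PSL PTB PUE PUT PVV PYK PYN PYP PYS ROM SEX SOA SOT SPA SUL TAK TET TIT TUE VCD VIH VLD VMO VNV ZAC ZAK ZOT'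
--     forbidden_list = forbidden_letter_combinations.split(' ')
--     forbidden_bool = forbidden(plate)
--     if forbidden_bool == True:
--         for i in forbidden_list:
--             if i in plate:
--                 return (f'forbidden plate - {i}')
--
--     # special
--     if ('1' <= plate <= '9') and plate.isdigit():
--         return (f'special plate - king and queen')
--     elif ('10' <= plate <= '09') and plate.isdigit():
--         return (f'special plate - royal')
--     elif 'A-1' <= plate <= 'A-999':
--         return (f'special plate - official')
--     elif 'CD-AA111' <= plate <= 'CD-ZZ999':
--         return ('special plate - diplomat')
--     elif 'G-LAA-111' <= plate <= 'G-LZZ-999':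
--         return ('special plate - agriculture')
--     elif 'M-AAA-000' <= plate <= 'M-ZZZ-999':
--         return ('special plate - motorcycle')
--     elif 'O-AAA-111' <= plate <= 'O-ZZZ-999':
--         return ('special plate - oldtimer')
--     elif 'Q-AAA-000' <= plate <= 'Q-ZZZ-999':
--         return ('special plate - trailer')
--     elif 'T-XAA-000' <= plate <= 'T-XZZ-999':
--         return ('special plate - taxi')
--     elif 'Y-AAA-000' <= plate <= 'Y-ZZZ-999':
--         return ('special plate - test')
--     # standard
--     elif '1-AAA-001' <= plate <= '7-ZZZ-999':
--         return ('standard plate - 2010-now')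
--     elif 'AAA-001' <= plate <= 'ZZZ-999':
--         return ('standard plate - 1973-2008')
--     elif 'A.001.A' <= plate <= 'Z.999.Z':
--         return ('standard plate - 1971-1973')
--     elif 'AA.001' <= plate <= 'ZZ.999':
--         return ('standard plate - 1962-1971')
--     elif '001-AAA' <= plate <= '999-CFQ':
--         return ('standard plate - 2008-2010')
-- ===== SOURCE B (Python) =====
-- # Different algorithm for the forbidden check: instead of testing each of the ~100
-- # forbidden combos for substring membership, scan the plate's 3-character windows
-- # once, collect those that are forbidden (hash-set lookup) and report the smallest.
-- # This matches A because A's forbidden list is sorted alphabetically, so the first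
-- # list entry occurring in the plate is the lexicographically smallest occurring one.
-- # The classification stays a first-match scan over an ordered (low, high, label) table.
--
-- FORBIDDEN_SET = set('AAP AAS AEL ALA ANE ASS BEB BIT BOM BOY BSP BUB BWP BYT CAP CDF CDH CDV CON CSP CUB CUL CUT CVP DCD DIK DOM FDF FOK FOL FOU FUC FUK GAT GAY GEK GOD HIV HOL JEK KAK KKQ KUL KUT LAF LDD LSP LUL MAS MCC MDP MOR MOU MST NIC NIK NIQ NVA PDB PDO PET PFF PIK PIN PIP PIS PJU PKK POT PRL PSB PSC PSL PTB PUE PUT PVV PYK PYN PYP PYS ROM SEX SOA SOT SPA SUL TAK TET TIT TUE VCD VIH VLD VMO VNV ZAC ZAK ZOT'.split(' '))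
--
-- RANGES = [
--     ('A-1', 'A-999', 'special plate - official'),
--     ('CD-AA111', 'CD-ZZ999', 'special plate - diplomat'),
--     ('G-LAA-111', 'G-LZZ-999', 'special plate - agriculture'),
--     ('M-AAA-000', 'M-ZZZ-999', 'special plate - motorcycle'),
--     ('O-AAA-111', 'O-ZZZ-999', 'special plate - oldtimer'),
--     ('Q-AAA-000', 'Q-ZZZ-999', 'special plate - trailer'),
--     ('T-XAA-000', 'T-XZZ-999', 'special plate - taxi'),
--     ('Y-AAA-000', 'Y-ZZZ-999', 'special plate - test'),
--     ('1-AAA-001', '7-ZZZ-999', 'standard plate - 2010-now'),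
--     ('AAA-001', 'ZZZ-999', 'standard plate - 1973-2008'),
--     ('A.001.A', 'Z.999.Z', 'standard plate - 1971-1973'),
--     ('AA.001', 'ZZ.999', 'standard plate - 1962-1971'),
--     ('001-AAA', '999-CFQ', 'standard plate - 2008-2010'),
-- ]
--
-- def check(plate):
--     hits = [w for w in (plate[i:i + 3] for i in range(len(plate) - 2)) if w in FORBIDDEN_SET]
--     if hits:
--         return f'forbidden plate - {min(hits)}'
--     if plate.isdigit() and '1' <= plate <= '9':
--         return 'special plate - king and queen'
--     for low, high, label in RANGES:
--         if low <= plate <= high: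
--             return label
--     return None
-- ===== Notes on version B (the rewrite author's own statement) =====
-- stated objective: alternative
-- what changed: For the forbidden check B scans the plate's 3-character windows once, collecting those found in a hash set of forbidden combos and reporting the lexicographically smallest (correct because A's forbidden list is sorted, so A's first matching list entry is the smallest combo occurring in the plate); the classification elif chain becomes a first-match scan over an ordered (low, high, label) table, with the impossible royal branch dropped.
import Mathlib
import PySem

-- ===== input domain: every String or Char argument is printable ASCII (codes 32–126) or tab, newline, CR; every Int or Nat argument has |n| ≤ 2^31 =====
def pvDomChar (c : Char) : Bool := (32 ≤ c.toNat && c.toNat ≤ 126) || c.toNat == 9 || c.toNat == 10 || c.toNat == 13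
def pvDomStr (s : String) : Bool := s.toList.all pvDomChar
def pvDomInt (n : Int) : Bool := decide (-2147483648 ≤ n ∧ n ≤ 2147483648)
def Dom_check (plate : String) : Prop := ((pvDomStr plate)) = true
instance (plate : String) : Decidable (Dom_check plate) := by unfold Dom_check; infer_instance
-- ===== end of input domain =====

-- B replaces A's scan over ~100 forbidden combos by one pass over the plate's
-- 3-character windows (set lookup, then the smallest hit — A's sorted list makes
-- first-in-list = smallest), and a data-driven table for the range chain; same values.

-- ===== PORT A =====
def pvForbiddenStr : String := "AAP AAS AEL ALA ANE ASS BEB BIT BOM BOY BSP BUB BWP BYT CAP CDF CDH CDV CON CSP CUB CUL CUT CVP DCD DIK DOM FDF FOK FOL FOU FUC FUK GAT GAY GEK GOD HIV HOL JEK KAK KKQ KUL KUT LAF LDD LSP LUL MAS MCC MDP MOR MOU MST NIC NIK NIQ NVA PDB PDO PET PFF PIK PIN PIP PIS PJU PKK POT PRL PSB PSC PSL PTB PUE PUT PVV PYK PYN PYP PYS ROM SEX SOA SOT SPA SUL TAK TET TIT TUE VCD VIH VLD VMO VNV ZAC ZAK ZOT"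

def pvForbiddenList : List String := (PySem.Str.split? pvForbiddenStr " ").getD []

-- the 'for i in forbidden_list: if i in plate: condition=True; break else: condition=False' loop of helper `forbidden`
def forbiddenLoop (plate : String) : List String → Bool
  | [] => false
  | i :: rest => if PySem.Str.isIn i plate then true else forbiddenLoop plate rest

def forbiddenA (plate : String) : Bool := forbiddenLoop plate pvForbiddenList

-- the early-return loop inside `check` (returns the f-string on the first match)
def checkForbiddenLoop (plate : String) : List String → Option String
  | [] => none
  | i :: rest =>
      if PySem.Str.isIn i plate then some ("forbidden plate - " ++ i)
      else checkForbiddenLoop plate rest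

def check (plate : String) : Option String :=
  let forbiddenBool := forbiddenA plate
  match (if forbiddenBool = true then checkForbiddenLoop plate pvForbiddenList else none) with
  | some r => some r
  | none =>
    if ("1" ≤ plate ∧ plate ≤ "9") ∧ PySem.Str.strIsdigit plate = true then
      some "special plate - king and queen"
    else if ("10" ≤ plate ∧ plate ≤ "09") ∧ PySem.Str.strIsdigit plate = true then
      some "special plate - royal"
    else if "A-1" ≤ plate ∧ plate ≤ "A-999" then some "special plate - official"
    else if "CD-AA111" ≤ plate ∧ plate ≤ "CD-ZZ999" then some "special plate - diplomat"
    else if "G-LAA-111" ≤ plate ∧ plate ≤ "G-LZZ-999" then some "special plate - agriculture"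
    else if "M-AAA-000" ≤ plate ∧ plate ≤ "M-ZZZ-999" then some "special plate - motorcycle"
    else if "O-AAA-111" ≤ plate ∧ plate ≤ "O-ZZZ-999" then some "special plate - oldtimer"
    else if "Q-AAA-000" ≤ plate ∧ plate ≤ "Q-ZZZ-999" then some "special plate - trailer"
    else if "T-XAA-000" ≤ plate ∧ plate ≤ "T-XZZ-999" then some "special plate - taxi"
    else if "Y-AAA-000" ≤ plate ∧ plate ≤ "Y-ZZZ-999" then some "special plate - test"
    else if "1-AAA-001" ≤ plate ∧ plate ≤ "7-ZZZ-999" then some "standard plate - 2010-now"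
    else if "AAA-001" ≤ plate ∧ plate ≤ "ZZZ-999" then some "standard plate - 1973-2008"
    else if "A.001.A" ≤ plate ∧ plate ≤ "Z.999.Z" then some "standard plate - 1971-1973"
    else if "AA.001" ≤ plate ∧ plate ≤ "ZZ.999" then some "standard plate - 1962-1971"
    else if "001-AAA" ≤ plate ∧ plate ≤ "999-CFQ" then some "standard plate - 2008-2010"
    else none

-- ===== PORT B =====
def pvForbiddenSet : PySem.Set String := PySem.Set.ofList pvForbiddenList

def pvRanges : List (String × String × String) :=
  [ ("A-1", "A-999", "special plate - official"),
    ("CD-AA111", "CD-ZZ999", "special plate - diplomat"),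
    ("G-LAA-111", "G-LZZ-999", "special plate - agriculture"),
    ("M-AAA-000", "M-ZZZ-999", "special plate - motorcycle"),
    ("O-AAA-111", "O-ZZZ-999", "special plate - oldtimer"),
    ("Q-AAA-000", "Q-ZZZ-999", "special plate - trailer"),
    ("T-XAA-000", "T-XZZ-999", "special plate - taxi"),
    ("Y-AAA-000", "Y-ZZZ-999", "special plate - test"),
    ("1-AAA-001", "7-ZZZ-999", "standard plate - 2010-now"),
    ("AAA-001", "ZZZ-999", "standard plate - 1973-2008"),
    ("A.001.A", "Z.999.Z", "standard plate - 1971-1973"),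
    ("AA.001", "ZZ.999", "standard plate - 1962-1971"),
    ("001-AAA", "999-CFQ", "standard plate - 2008-2010") ]

-- the generator '(plate[i:i+3] for i in range(len(plate) - 2))'
def pvWindows (plate : String) : List String :=
  (PySem.List.pyRange 0 (PySem.Str.len plate - 2)).map
    (fun i => PySem.Str.slice plate (some i) (some (i + 3)))

-- 'for low, high, label in RANGES: if low <= plate <= high: return label'
def altRangeLoop (plate : String) : List (String × String × String) → Option String
  | [] => none
  | (low, high, label) :: rest =>
      if low ≤ plate ∧ plate ≤ high then some label else altRangeLoop plate rest

def check_alt (plate : String) : Option String :=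
  let hits := (pvWindows plate).filter (fun w => PySem.Set.contains pvForbiddenSet w)
  match PySem.List.min? hits (fun w => w) with   -- 'if hits: return f"…{min(hits)}"'
  | some m => some ("forbidden plate - " ++ m)
  | none =>
      if PySem.Str.strIsdigit plate = true ∧ ("1" ≤ plate ∧ plate ≤ "9") then
        some "special plate - king and queen"
      else altRangeLoop plate pvRanges

-- ===== PRECONDITION & SPEC =====
def Spec_check (plate : String) (out : Option String) : Prop := out = check_alt plate
instance (plate : String) (out : Option String) : Decidable (Spec_check plate out) := by unfold Spec_check; infer_instance

-- ===== CLAIM (what is proved, stated in full; the proofs are below) =====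
def Claim_equal_check : Prop := ∀ (plate : String), Dom_check plate → Spec_check plate (check plate)

-- ===== LEMMAS AND PROOFS =====

-- the forbidden list, evaluated once to a literal (so later facts need not re-run split)
set_option maxRecDepth 100000 in
theorem pvForbiddenList_lit : pvForbiddenList = ["AAP", "AAS", "AEL", "ALA", "ANE", "ASS", "BEB", "BIT", "BOM", "BOY", "BSP", "BUB", "BWP", "BYT", "CAP", "CDF", "CDH", "CDV", "CON", "CSP", "CUB", "CUL", "CUT", "CVP", "DCD", "DIK", "DOM", "FDF", "FOK", "FOL", "FOU", "FUC", "FUK", "GAT", "GAY", "GEK", "GOD", "HIV", "HOL", "JEK", "KAK", "KKQ", "KUL", "KUT", "LAF", "LDD", "LSP", "LUL", "MAS", "MCC", "MDP", "MOR", "MOU", "MST", "NIC", "NIK", "NIQ", "NVA", "PDB", "PDO", "PET", "PFF", "PIK", "PIN", "PIP", "PIS", "PJU", "PKK", "POT", "PRL", "PSB", "PSC", "PSL", "PTB", "PUE", "PUT", "PVV", "PYK", "PYN", "PYP", "PYS", "ROM", "SEX", "SOA", "SOT", "SPA", "SUL", "TAK", "TET", "TIT", "TUE", "VCD", "VIH",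 "VLD", "VMO", "VNV", "ZAC", "ZAK", "ZOT"] := by
  decide

set_option maxRecDepth 100000 in
theorem pvForbiddenList_sorted : pvForbiddenList.Pairwise (fun a b => a.toList < b.toList) := by
  rw [pvForbiddenList_lit]; decide

set_option maxRecDepth 100000 in
theorem pvForbiddenList_len3 : ∀ c ∈ pvForbiddenList, c.toList.length = 3 := by
  rw [pvForbiddenList_lit]; decide

-- A's helper-loop flag is exactly "the early-return loop finds something"
theorem forbiddenLoop_eq_isSome (plate : String) (l : List String) :
    forbiddenLoop plate l = (checkForbiddenLoop plate l).isSome := by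
  induction l with
  | nil => rfl
  | cons i rest ih =>
      by_cases h : PySem.Chars.isIn i.toList plate.toList = true <;>
        simp [forbiddenLoop, checkForbiddenLoop, h, ih]

-- membership in the window list, in drop/take terms
theorem mem_pvWindows (plate w : String) :
    w ∈ pvWindows plate ↔
      ∃ k : Nat, k + 3 ≤ plate.toList.length ∧ (plate.toList.drop k).take 3 = w.toList := by
  unfold pvWindows
  rw [List.mem_map]
  constructor
  · rintro ⟨i, hi, rfl⟩
    rw [PySem.List.mem_pyRange_one] at hi
    obtain ⟨k, rfl⟩ := Int.eq_ofNat_of_zero_le hi.1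
    have hk : k + 3 ≤ plate.toList.length := by
      have := hi.2
      rw [PySem.Str.len_eq] at this
      omega
    refine ⟨k, hk, ?_⟩
    rw [PySem.Str.toList_slice, PySem.Chars.slice_eq_listSlice]
    have h3 : ((k : Int) + 3) = ((k : Int) + ((3 : Nat) : Int)) := by norm_num
    rw [h3, PySem.List.slice_natCast_add]
  · rintro ⟨k, hk, htake⟩
    refine ⟨(k : Int), ?_, ?_⟩
    · rw [PySem.List.mem_pyRange_one, PySem.Str.len_eq]
      constructor
      · exact Int.natCast_nonneg k
      · omega
    · rw [← String.toList_inj, PySem.Str.toList_slice, PySem.Chars.slice_eq_listSlice]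
      have h3 : ((k : Int) + 3) = ((k : Int) + ((3 : Nat) : Int)) := by norm_num
      rw [h3, PySem.List.slice_natCast_add, htake]

-- every window occurs in the plate
theorem isIn_of_mem_pvWindows (plate w : String) (h : w ∈ pvWindows plate) :
    PySem.Str.isIn w plate = true := by
  obtain ⟨k, _, htake⟩ := (mem_pvWindows plate w).mp h
  rw [PySem.Str.isIn_eq, ← PySem.Chars.exists_prefix_drop_iff_isIn]
  exact ⟨k, by rw [← htake]; exact List.take_prefix 3 _⟩

-- a 3-character string occurs in the plate iff it is one of the plate's windows
theorem isIn_iff_mem_pvWindows (plate c : String) (hc : c.toList.length = 3) :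
    PySem.Str.isIn c plate = true ↔ c ∈ pvWindows plate := by
  constructor
  · intro h
    rw [PySem.Str.isIn_eq, ← PySem.Chars.exists_prefix_drop_iff_isIn] at h
    obtain ⟨j, hpre⟩ := h
    rw [List.prefix_iff_eq_take] at hpre
    rw [hc] at hpre
    have hlen : c.toList.length = ((plate.toList.drop j).take 3).length := by rw [hpre]
    rw [hc, List.length_take, List.length_drop] at hlen
    exact (mem_pvWindows plate c).mpr ⟨j, by omega, hpre.symm⟩
  · exact isIn_of_mem_pvWindows plate c

-- the filtered window list ('hits')
theorem mem_hits (plate w : String) :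
    w ∈ (pvWindows plate).filter (fun w => PySem.Set.contains pvForbiddenSet w) ↔
      w ∈ pvWindows plate ∧ w ∈ pvForbiddenList := by
  rw [List.mem_filter, PySem.Set.contains_iff, pvForbiddenSet, PySem.Set.mem_ofList]

-- first match of the early-return loop over a strictly sorted list: none and no
-- entry occurs, or it is the smallest entry occurring in the plate
theorem checkForbiddenLoop_first (plate : String) :
    ∀ (L : List String), L.Pairwise (fun a b => a.toList < b.toList) →
      (checkForbiddenLoop plate L = none ∧ ∀ c ∈ L, PySem.Str.isIn c plate = false) ∨
      (∃ c, c ∈ L ∧ checkForbiddenLoop plate L = some ("forbidden plate - " ++ c) ∧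
        PySem.Str.isIn c plate = true ∧
        ∀ c' ∈ L, PySem.Str.isIn c' plate = true → c ≤ c') := by
  intro L
  induction L with
  | nil => intro _; exact Or.inl ⟨rfl, by simp⟩
  | cons i rest ih =>
      intro hp
      rw [List.pairwise_cons] at hp
      by_cases hin : PySem.Str.isIn i plate = true
      · have hin' : PySem.Chars.isIn i.toList plate.toList = true := by
          rw [← PySem.Str.isIn_eq]; exact hin
        refine Or.inr ⟨i, List.mem_cons_self, by simp [checkForbiddenLoop, hin'], hin, ?_⟩
        intro c' hc' _
        rcases List.mem_cons.mp hc' with h | h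
        · exact le_of_eq h.symm
        · exact le_of_lt (String.lt_iff_toList_lt.mpr (hp.1 c' h))
      · have hin' : PySem.Chars.isIn i.toList plate.toList = false := by
          rw [← PySem.Str.isIn_eq]; exact Bool.eq_false_iff.mpr hin
        rcases ih hp.2 with ⟨hnone, hall⟩ | ⟨c, hcmem, heq, hcin, hmin⟩
        · refine Or.inl ⟨by simp [checkForbiddenLoop, hin', hnone], ?_⟩
          intro c hc
          rcases List.mem_cons.mp hc with h | h
          · subst h; exact Bool.eq_false_iff.mpr hin
          · exact hall c h
        · refine Or.inr ⟨c, List.mem_cons_of_mem i hcmem,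
            by simp [checkForbiddenLoop, hin', heq], hcin, ?_⟩
          intro c' hc' hc'in
          rcases List.mem_cons.mp hc' with h | h
          · subst h; exact absurd hc'in hin
          · exact hmin c' h hc'in

-- the royal range is empty: "10" <= plate <= "09" is impossible
theorem royal_empty (plate : String) : ¬ (("10" : String) ≤ plate ∧ plate ≤ "09") := by
  rintro ⟨h1, h2⟩
  have h := le_trans h1 h2
  rw [String.le_iff_toList_le] at h
  revert h
  decide

-- ===== VERDICT (by name: the statement is the Claim_ definition above) =====
theorem check_spec : Claim_equal_check := by
  intro plate _
  unfold Spec_check check check_alt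
  simp only [forbiddenA, forbiddenLoop_eq_isSome]
  rcases checkForbiddenLoop_first plate pvForbiddenList pvForbiddenList_sorted with
    ⟨hnone, hall⟩ | ⟨c, hcmem, heq, hcin, hmin⟩
  · -- no forbidden combo occurs: the hits list is empty and both fall through
    have hhits : (pvWindows plate).filter (fun w => PySem.Set.contains pvForbiddenSet w) = [] := by
      rw [List.eq_nil_iff_forall_not_mem]
      intro w hw
      obtain ⟨hwin, hmem⟩ := (mem_hits plate w).mp hw
      have := hall w hmem
      rw [isIn_of_mem_pvWindows plate w hwin] at this
      simp at this
    rw [hnone]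
    simp only [hhits]
    have hminnone : PySem.List.min? ([] : List String) (fun w => w) = none :=
      (PySem.List.min?_eq_none_iff _ _).mpr rfl
    rw [hminnone]
    simp only [Option.isSome_none, Bool.false_eq_true, if_false]
    simp only [altRangeLoop, pvRanges]
    have hroyal : ((("10" : String) ≤ plate ∧ plate ≤ "09") ∧
        PySem.Str.strIsdigit plate = true) ↔ False :=
      iff_false_intro (fun h => royal_empty plate h.1)
    have hking : ((("1" : String) ≤ plate ∧ plate ≤ "9") ∧
        PySem.Str.strIsdigit plate = true) ↔
        (PySem.Str.strIsdigit plate = true ∧ (("1" : String) ≤ plate ∧ plate ≤ "9")) :=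
      and_comm
    simp only [hroyal, hking, if_false]
  · -- the first forbidden match c is the smallest hit
    have hchit : c ∈ (pvWindows plate).filter (fun w => PySem.Set.contains pvForbiddenSet w) :=
      (mem_hits plate c).mpr
        ⟨(isIn_iff_mem_pvWindows plate c (pvForbiddenList_len3 c hcmem)).mp hcin, hcmem⟩
    have hminc : PySem.List.min? ((pvWindows plate).filter
        (fun w => PySem.Set.contains pvForbiddenSet w)) (fun w => w) = some c := by
      cases hmq : PySem.List.min? ((pvWindows plate).filter
          (fun w => PySem.Set.contains pvForbiddenSet w)) (fun w => w) with
      | none =>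
          rw [PySem.List.min?_eq_none_iff] at hmq
          rw [hmq] at hchit
          exact absurd hchit (List.not_mem_nil)
      | some m =>
          obtain ⟨hmwin, hmmem⟩ := (mem_hits plate m).mp (PySem.List.min?_mem hmq)
          have h1 : c ≤ m := hmin m hmmem (isIn_of_mem_pvWindows plate m hmwin)
          have h2 : m ≤ c := PySem.List.min?_isMin hmq c hchit
          rw [le_antisymm h2 h1]
    rw [heq]
    simp only [hminc, Option.isSome_some, if_true]
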